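-- pv_equiv track=rewrite | github.com/Heron4gf/reply-agent-challenge | utils/suspicious_context.py | _index_biotag_by_iban
-- ===== SOURCE A (Python) =====
-- from typing import Any, Iterable
--
-- def _index_biotag_by_iban(transactions: Iterable[dict[str, Any]]) -> dict[str, str]:
--     mapping: dict[str, str] = {}
--     for tx in transactions:
--         sender_iban = tx.get("sender_iban")
--         sender_id = tx.get("sender_id")
--         if sender_iban and sender_id and sender_iban not in mapping:
--             mapping[sender_iban] = sender_id
--     return mapping
-- ===== SOURCE B (Python) =====
-- def _index_biotag_by_iban(transactions):
--     pairs = [(tx.get("sender_iban"), tx.get("sender_id")) for tx in transactions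
--              if tx.get("sender_iban") and tx.get("sender_id")]
--     firsts = {iban: sid for iban, sid in reversed(pairs)}
--     return {iban: firsts[iban] for iban, _ in pairs}
-- ===== Notes on version B (the rewrite author's own statement) =====
-- stated objective: alternative
-- what changed: Replaces A's single loop with a membership-guarded insert by three comprehension-style passes: collect the valid (iban, sid) pairs, build a value map by a dict comprehension over the reversed pair list (each earlier occurrence overwrites, so the first value wins with no 'not in' test), then emit the result in first-occurrence order by a forward dict comprehension re-keyed through that map.
import Mathlib
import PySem

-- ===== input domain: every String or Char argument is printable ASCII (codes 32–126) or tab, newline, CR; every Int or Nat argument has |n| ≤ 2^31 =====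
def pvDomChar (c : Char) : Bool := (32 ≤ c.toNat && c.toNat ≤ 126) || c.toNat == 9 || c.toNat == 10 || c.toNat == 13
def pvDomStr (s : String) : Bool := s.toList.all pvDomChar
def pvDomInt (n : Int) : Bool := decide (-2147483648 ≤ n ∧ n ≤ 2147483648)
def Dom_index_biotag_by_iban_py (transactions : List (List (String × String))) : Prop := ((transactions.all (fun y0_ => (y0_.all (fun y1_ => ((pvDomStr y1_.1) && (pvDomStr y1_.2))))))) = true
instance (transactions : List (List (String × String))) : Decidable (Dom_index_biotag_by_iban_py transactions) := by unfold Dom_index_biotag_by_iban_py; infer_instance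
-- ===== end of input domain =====

-- B rebuilds the result from three comprehension-style passes (valid pairs, a reversed
-- dict comprehension in which the earliest value wins by overwrite, a forward re-keying
-- comprehension restoring first-occurrence order); objective: alternative, no speed claim.

-- ===== PORT A =====
-- one iteration of A's 'for tx in transactions' loop
def pvAStep (mapping : PySem.Dict String String) (tx : List (String × String)) : PySem.Dict String String :=
  match (PySem.Dict.ofList tx).get? "sender_iban", (PySem.Dict.ofList tx).get? "sender_id" with
  | some sender_iban, some sender_id =>
      if sender_iban ≠ "" ∧ sender_id ≠ "" ∧ mapping.contains sender_iban = false then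
        mapping.insert sender_iban sender_id
      else mapping
  | _, _ => mapping

def index_biotag_by_iban_py (transactions : List (List (String × String))) : List (String × String) :=
  (transactions.foldl pvAStep PySem.Dict.empty).items

-- ===== PORT B =====
-- the element-wise test of Source B's first list comprehension: the (iban, sid) pair when
-- both tx.get values are present and truthy, none otherwise
def pvValidPair (tx : List (String × String)) : Option (String × String) :=
  match (PySem.Dict.ofList tx).get? "sender_iban", (PySem.Dict.ofList tx).get? "sender_id" with
  | some sender_iban, some sender_id =>
      if sender_iban ≠ "" ∧ sender_id ≠ "" then some (sender_iban, sender_id) else none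
  | _, _ => none

-- Source B: pairs; firsts = reversed dict comprehension; forward dict comprehension keyed by
-- firsts[iban] (ported as getD with "" — the key is always present, so the default is unused)
def index_biotag_by_iban_py_alt (transactions : List (List (String × String))) : List (String × String) :=
  let pairs := transactions.filterMap pvValidPair
  let firsts := pairs.reverse.foldl (fun d p => d.insert p.1 p.2) (PySem.Dict.empty : PySem.Dict String String)
  (pairs.foldl (fun d p => d.insert p.1 (firsts.getD p.1 "")) (PySem.Dict.empty : PySem.Dict String String)).items

-- ===== PRECONDITION & SPEC =====
def Spec_index_biotag_by_iban_py (transactions : List (List (String × String))) (out : List (String × String)) : Prop := out = index_biotag_by_iban_py_alt transactions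
instance (transactions : List (List (String × String))) (out : List (String × String)) : Decidable (Spec_index_biotag_by_iban_py transactions out) := by unfold Spec_index_biotag_by_iban_py; infer_instance

-- ===== CLAIM (what is proved, stated in full; the proofs are below) =====
def Claim_equal_index_biotag_by_iban_py : Prop := ∀ (transactions : List (List (String × String))), Dom_index_biotag_by_iban_py transactions → Spec_index_biotag_by_iban_py transactions (index_biotag_by_iban_py transactions)

-- ===== LEMMAS AND PROOFS =====

-- first value stored under key k in a pair list
def pvFirstVal (l : List (String × String)) (k : String) : Option String :=
  (l.find? (fun p => p.1 == k)).map (·.2)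

-- A's conditional step, on a dict with unique keys, is an unconditional insert that
-- keeps the stored value when the key is already present
theorem pvAStep_eq_insert (d : PySem.Dict String String) (i s : String)
    (hnd : d.keys.Nodup) :
    (if d.contains i = false then d.insert i s else d) = d.insert i (d.getD i s) := by
  by_cases hc : d.contains i = false
  · rw [if_pos hc, PySem.Dict.getD_of_not_contains d s hc]
  · have hc' : d.contains i = true := by revert hc; cases d.contains i <;> simp
    rw [if_neg hc]
    apply PySem.Dict.ext
    rw [PySem.Dict.items_insert_of_contains d _ hc']
    symm
    refine (List.map_congr_left ?_).trans (List.map_id d.items)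
    intro p hp
    by_cases hk : (p.1 == i) = true
    · have hk' : p.1 = i := by simpa using hk
      have hmem : (i, p.2) ∈ d.items := by
        have hp' : p = (i, p.2) := by rw [← hk']
        rw [← hp']; exact hp
      have hv : d.getD i s = p.2 := PySem.Dict.getD_of_mem_items d hmem hnd s
      rw [if_pos hk, hv, ← hk']; rfl
    · simp [hk]

-- A's loop over transactions = the uniform-insert fold over the valid pairs
theorem pvA_as_pairs (ts : List (List (String × String))) (d : PySem.Dict String String)
    (hnd : d.keys.Nodup) :
    ts.foldl pvAStep d
      = (ts.filterMap pvValidPair).foldl (fun d p => d.insert p.1 (d.getD p.1 p.2)) d := by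
  induction ts generalizing d with
  | nil => rfl
  | cons tx rest ih =>
      have hstep : pvAStep d tx
          = match pvValidPair tx with
            | some p => d.insert p.1 (d.getD p.1 p.2)
            | none => d := by
        unfold pvAStep pvValidPair
        cases h1 : (PySem.Dict.ofList tx).get? "sender_iban" with
        | none => rfl
        | some i =>
          cases h2 : (PySem.Dict.ofList tx).get? "sender_id" with
          | none => rfl
          | some s =>
            by_cases hv : i ≠ "" ∧ s ≠ ""
            · have := pvAStep_eq_insert d i s hnd
              by_cases hc : d.contains i = false
              · simpa [hv, hc] using this
              · simpa [hv, hc] using this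
            · show (if i ≠ "" ∧ s ≠ "" ∧ d.contains i = false then d.insert i s else d)
                  = match (if i ≠ "" ∧ s ≠ "" then some (i, s) else none) with
                    | some p => d.insert p.1 (d.getD p.1 p.2)
                    | none => d
              rw [if_neg (fun hx : i ≠ "" ∧ s ≠ "" ∧ d.contains i = false => hv ⟨hx.1, hx.2.1⟩), if_neg hv]
      cases h : pvValidPair tx with
      | none =>
          rw [List.foldl_cons, List.filterMap_cons, h, hstep, h]
          exact ih d hnd
      | some p =>
          rw [List.foldl_cons, List.filterMap_cons, h, hstep, h, List.foldl_cons]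
          exact ih _ (PySem.Dict.nodup_keys_insert _ _ _ hnd)

-- lookup after the uniform-insert fold: the old binding, else the FIRST value of the list
theorem pvA_get? (l : List (String × String)) (d : PySem.Dict String String) (k : String) :
    (l.foldl (fun d p => d.insert p.1 (d.getD p.1 p.2)) d).get? k
      = (d.get? k).or (pvFirstVal l k) := by
  induction l generalizing d with
  | nil => simp [pvFirstVal]
  | cons p l ih =>
      rw [List.foldl_cons, ih]
      by_cases hk : k = p.1
      · subst hk
        rw [PySem.Dict.get?_insert_self, PySem.Dict.getD_eq_get?_getD]
        cases d.get? p.1 <;> simp [pvFirstVal]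
      · rw [PySem.Dict.get?_insert_of_ne _ _ hk]
        simp [pvFirstVal, Ne.symm hk]

-- lookup after Source B's reversed dict comprehension: the first value of the ORIGINAL
-- (un-reversed) list wins, because later inserts of the same key overwrite
theorem pvFirsts_get? (l : List (String × String)) (d : PySem.Dict String String) (k : String) :
    (l.foldl (fun d p => d.insert p.1 p.2) d).get? k
      = (pvFirstVal l.reverse k).or (d.get? k) := by
  induction l generalizing d with
  | nil => simp [pvFirstVal]
  | cons p l ih =>
      rw [List.foldl_cons, ih, List.reverse_cons]
      by_cases hk : k = p.1
      · subst hk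
        rw [PySem.Dict.get?_insert_self]
        simp only [pvFirstVal, List.find?_append]
        cases List.find? (fun q => q.1 == p.1) l.reverse <;> simp
      · rw [PySem.Dict.get?_insert_of_ne _ _ hk]
        simp only [pvFirstVal, List.find?_append]
        cases List.find? (fun q => q.1 == k) l.reverse <;> simp [Ne.symm hk]

-- lookup after Source B's forward re-keying fold, whose inserted value depends only on the key
theorem pvB_get? (m : PySem.Dict String String) (l : List (String × String))
    (d : PySem.Dict String String) (k : String) :
    (l.foldl (fun d p => d.insert p.1 (m.getD p.1 "")) d).get? k
      = if k ∈ l.map (·.1) then some (m.getD k "") else d.get? k := by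
  induction l generalizing d with
  | nil => simp
  | cons p l ih =>
      rw [List.foldl_cons, ih]
      by_cases hm : k ∈ l.map (·.1)
      · simp [hm]
      · by_cases hk : k = p.1
        · subst hk; simp [hm, PySem.Dict.get?_insert_self]
        · simp [hm, hk, PySem.Dict.get?_insert_of_ne _ _ hk]

-- ===== VERDICT (by name: the statement is the Claim_ definition above) =====
theorem index_biotag_by_iban_py_spec : Claim_equal_index_biotag_by_iban_py := by
  intro ts _
  show index_biotag_by_iban_py ts = index_biotag_by_iban_py_alt ts
  simp only [index_biotag_by_iban_py, index_biotag_by_iban_py_alt]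
  rw [pvA_as_pairs ts PySem.Dict.empty PySem.Dict.nodup_keys_empty]
  set pairs := ts.filterMap pvValidPair with hpairs
  set firsts := pairs.reverse.foldl (fun d p => d.insert p.1 p.2) (PySem.Dict.empty : PySem.Dict String String) with hfirsts
  set dA := pairs.foldl (fun d p => d.insert p.1 (d.getD p.1 p.2)) (PySem.Dict.empty : PySem.Dict String String) with hdA
  set dB := pairs.foldl (fun d p => d.insert p.1 (firsts.getD p.1 "")) (PySem.Dict.empty : PySem.Dict String String) with hdB
  have hndA : dA.keys.Nodup :=
    PySem.Dict.nodup_keys_foldl_insert_key pairs (fun p => p.1) (fun d p => d.getD p.1 p.2) PySem.Dict.empty PySem.Dict.nodup_keys_empty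
  have hndB : dB.keys.Nodup :=
    PySem.Dict.nodup_keys_foldl_insert_key pairs (fun p => p.1) (fun _ p => firsts.getD p.1 "") PySem.Dict.empty PySem.Dict.nodup_keys_empty
  have hkeys : dA.keys = dB.keys := by
    have h1 := PySem.Dict.keys_foldl_insert_key (ν := String) pairs (fun p => p.1) (fun d p => d.getD p.1 p.2) PySem.Dict.empty
    have h2 := PySem.Dict.keys_foldl_insert_key (ν := String) pairs (fun p => p.1) (fun _ p => firsts.getD p.1 "") PySem.Dict.empty
    exact h1.trans h2.symm
  rw [PySem.Dict.items_eq_map_keys dA hndA "", PySem.Dict.items_eq_map_keys dB hndB "", hkeys]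
  refine List.map_congr_left ?_
  intro k hk
  have hgA : dA.get? k = pvFirstVal pairs k := by
    rw [hdA, pvA_get?, PySem.Dict.get?_empty, Option.none_or]
  have hmem : k ∈ pairs.map (·.1) := by
    by_contra hm
    have hnone : dB.get? k = none := by
      rw [hdB, pvB_get?, if_neg hm, PySem.Dict.get?_empty]
    exact ((PySem.Dict.get?_eq_none_iff_not_mem_keys dB k).mp hnone) hk
  have hgB : dB.get? k = some (firsts.getD k "") := by
    rw [hdB, pvB_get?, if_pos hmem]
  have hfv : firsts.get? k = pvFirstVal pairs k := by
    rw [hfirsts, pvFirsts_get?, List.reverse_reverse, PySem.Dict.get?_empty, Option.or_none]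
  have : dA.getD k "" = dB.getD k "" := by
    rw [PySem.Dict.getD_eq_get?_getD, PySem.Dict.getD_eq_get?_getD, hgA, hgB,
        PySem.Dict.getD_eq_get?_getD, hfv]
    cases pvFirstVal pairs k <;> simp
  rw [this]
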